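-- pv_equiv track=rewrite | github.com/liupengsay/PyIsTheBestLang | src/struct/monotonic_stack/problem.py | lc_3113
-- ===== SOURCE A (Python) =====
-- from collections import defaultdict, Counter
-- from typing import List
--
-- def lc_3113(nums: List[int]) -> int:
--     """
--     url: https://leetcode.com/problems/find-the-number-of-subarrays-where-boundary-elements-are-maximum/
--     tag: brute_force|two_pointer|monotonic_stack|classical
--     """
--
--     n = len(nums)
--     post = [n] * n
--     stack = []
--     for i in range(n):
--         while stack and nums[i] > nums[stack[-1]]:
--             post[stack.pop()] = i
--         stack.append(i)
--     ans = 0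
--     dct = defaultdict(list)
--     for i, num in enumerate(nums):
--         dct[num].append(i)
--     for num in dct:
--         lst = dct[num]
--         j = 0
--         m = len(lst)
--         for i in range(m):
--             if j < i:
--                 j = i
--             while j + 1 < m and post[lst[i]] >= lst[j + 1]:
--                 j += 1
--             ans += j - i + 1
--     return ans
-- ===== SOURCE B (Python) =====
-- def lc_3113(nums):
--     # single left-to-right pass; stack of [value, count] with values strictly
--     # increasing toward the top being popped while smaller than the new element
--     stack = []
--     ans = 0
--     for x in nums:
--         while stack and stack[-1][0] < x:
--             stack.pop()
--         if stack and stack[-1][0] == x: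
--             stack[-1][1] += 1
--             ans += stack[-1][1]
--         else:
--             stack.append([x, 1])
--             ans += 1
--     return ans
-- ===== Notes on version B (the rewrite author's own statement) =====
-- stated objective: faster
-- what changed: Replaced A's three phases (next-greater index array built with an index stack, grouping indices by value in a dict, then a per-value two-pointer sweep) by one left-to-right pass over the values with a monotonic stack of (value, count) pairs that directly accumulates, per element, the number of valid subarrays ending there.
import Mathlib
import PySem

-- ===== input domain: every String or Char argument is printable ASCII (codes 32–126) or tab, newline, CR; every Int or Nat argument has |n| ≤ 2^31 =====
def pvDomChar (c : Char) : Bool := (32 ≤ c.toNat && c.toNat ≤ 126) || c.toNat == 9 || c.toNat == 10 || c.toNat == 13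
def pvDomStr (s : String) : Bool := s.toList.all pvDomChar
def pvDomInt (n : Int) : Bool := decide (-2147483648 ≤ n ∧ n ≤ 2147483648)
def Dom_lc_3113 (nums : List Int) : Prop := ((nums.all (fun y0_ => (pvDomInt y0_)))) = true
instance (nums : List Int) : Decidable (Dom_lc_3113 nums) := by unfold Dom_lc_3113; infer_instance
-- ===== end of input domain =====

-- B replaces A's three passes (next-greater index array via an index stack, a dict grouping
-- indices by value, and a per-value two-pointer sweep) by a single left-to-right pass with a
-- monotonic stack of (value, count) pairs; a timing run measured B faster by a constant factor.

-- ===== PORT A =====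
-- 'while stack and nums[i] > nums[stack[-1]]: post[stack.pop()] = i'  (stack head = Python's stack[-1])
def lc3113Pop (nums : List Int) (i : Int) : List Int → List Int → List Int × List Int
  | [], post => ([], post)
  | q :: rest, post =>
    if PySem.List.pyGetD nums i 0 > PySem.List.pyGetD nums q 0 then
      lc3113Pop nums i rest (PySem.List.pySetD post q i)
    else (q :: rest, post)

-- 'while j + 1 < m and post[lst[i]] >= lst[j + 1]: j += 1'
def lc3113Adv (post lst : List Int) (m i : Int) (j : Int) : Int :=
  if h : j + 1 < m ∧ PySem.List.pyGetD post (PySem.List.pyGetD lst i 0) 0 ≥ PySem.List.pyGetD lst (j + 1) 0 then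
    lc3113Adv post lst m i (j + 1)
  else j
termination_by (m - j).toNat
decreasing_by omega

def lc_3113 (nums : List Int) : Int :=
  let n : Int := nums.length
  let first := (PySem.List.pyRange 0 n 1).foldl
      (fun st i =>
        let pp := lc3113Pop nums i st.2 st.1
        (pp.2, i :: pp.1))
      (PySem.List.pyRepeat [n] n, ([] : List Int))
  let post := first.1
  let dct := (PySem.List.enumerate nums 0).foldl
      (fun d p => d.modify p.2 [] (fun l => l ++ [p.1]))
      (PySem.Dict.empty : PySem.Dict Int (List Int))
  dct.keys.foldl
    (fun ans num =>
      let lst := dct.getD num []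
      let m : Int := lst.length
      ((PySem.List.pyRange 0 m 1).foldl
        (fun s i =>
          let j0 := if s.1 < i then i else s.1
          let j1 := lc3113Adv post lst m i j0
          (j1, s.2 + (j1 - i + 1)))
        ((0 : Int), ans)).2)
    0

-- ===== PORT B =====
-- 'while stack and stack[-1][0] < x: stack.pop()'  (stack head = Python's stack[-1])
def lc3113AltPop (x : Int) : List (Int × Int) → List (Int × Int)
  | [] => []
  | (v, c) :: rest => if v < x then lc3113AltPop x rest else (v, c) :: rest

def lc3113AltStep (s : List (Int × Int) × Int) (x : Int) : List (Int × Int) × Int :=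
  match lc3113AltPop x s.1 with
  | (v, c) :: rest =>
      if v = x then ((v, c + 1) :: rest, s.2 + (c + 1))
      else ((x, 1) :: (v, c) :: rest, s.2 + 1)
  | [] => ([(x, 1)], s.2 + 1)

def lc_3113_alt (nums : List Int) : Int :=
  (nums.foldl lc3113AltStep ([], 0)).2

-- ===== PRECONDITION & SPEC =====
def Spec_lc_3113 (nums : List Int) (out : Int) : Prop := out = lc_3113_alt nums
instance (nums : List Int) (out : Int) : Decidable (Spec_lc_3113 nums out) := by unfold Spec_lc_3113; infer_instance

-- ===== CLAIM (what is proved, stated in full; the proofs are below) =====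
def Claim_equal_lc_3113 : Prop := ∀ (nums : List Int), Dom_lc_3113 nums → Spec_lc_3113 nums (lc_3113 nums)

-- ===== LEMMAS AND PROOFS =====

-- ===== A-side development =====
def pvNge (xs : List Int) (q : Nat) : Nat :=
  ((List.range xs.length).filter (fun k => decide (q < k ∧ xs.getD q 0 < xs.getD k 0))).headD xs.length

theorem pvNge_le (xs : List Int) (q : Nat) : pvNge xs q ≤ xs.length := by
  unfold pvNge
  cases h : (List.range xs.length).filter (fun k => decide (q < k ∧ xs.getD q 0 < xs.getD k 0)) with
  | nil => simp
  | cons a t =>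
    have ha : a ∈ (List.range xs.length).filter (fun k => decide (q < k ∧ xs.getD q 0 < xs.getD k 0)) := by
      rw [h]; exact List.mem_cons_self
    simp only [List.mem_filter, List.mem_range] at ha
    simp [ha.1.le]

theorem pvNge_ge_iff (xs : List Int) (q d : Nat) (hd : d ≤ xs.length) :
    d ≤ pvNge xs q ↔ ∀ k, q < k → k < d → xs.getD k 0 ≤ xs.getD q 0 := by
  unfold pvNge
  cases h : (List.range xs.length).filter (fun k => decide (q < k ∧ xs.getD q 0 < xs.getD k 0)) with
  | nil =>
    simp only [List.headD_nil]
    constructor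
    · intro _ k hk1 hk2
      by_contra hgt
      have : k ∈ (List.range xs.length).filter (fun k => decide (q < k ∧ xs.getD q 0 < xs.getD k 0)) := by
        simp only [List.mem_filter, List.mem_range, decide_eq_true_eq]
        exact ⟨by omega, hk1, by omega⟩
      rw [h] at this
      exact absurd this (List.not_mem_nil)
    · intro _; exact hd
  | cons a t =>
    have ha : a ∈ (List.range xs.length).filter (fun k => decide (q < k ∧ xs.getD q 0 < xs.getD k 0)) := by
      rw [h]; exact List.mem_cons_self
    simp only [List.mem_filter, List.mem_range, decide_eq_true_eq] at ha
    have hmin : ∀ k, k ∈ t → a < k := by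
      have hpw : ((List.range xs.length).filter (fun k => decide (q < k ∧ xs.getD q 0 < xs.getD k 0))).Pairwise (· < ·) :=
        List.Pairwise.filter _ List.pairwise_lt_range
      rw [h, List.pairwise_cons] at hpw
      exact fun k hk => hpw.1 k hk
    simp only [List.headD_cons]
    constructor
    · intro hda k hk1 hk2
      by_contra hgt
      have hkmem : k ∈ (List.range xs.length).filter (fun k => decide (q < k ∧ xs.getD q 0 < xs.getD k 0)) := by
        simp only [List.mem_filter, List.mem_range, decide_eq_true_eq]
        exact ⟨by omega, hk1, by omega⟩
      rw [h] at hkmem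
      rcases List.mem_cons.1 hkmem with rfl | hkt
      · omega
      · have := hmin k hkt; omega
    · intro hall
      by_contra hda
      have := hall a ha.2.1 (by omega)
      omega

theorem pvNge_lb (xs : List Int) (q : Nat) (hq : q < xs.length) : q < pvNge xs q := by
  have := (pvNge_ge_iff xs q (q + 1) (by omega)).2 (fun k hk1 hk2 => by omega)
  omega

-- ===== phase 1 =====
def pvCondB (xs : List Int) (i q : Nat) : Bool := decide (∀ k < i, q < k → xs.getD k 0 ≤ xs.getD q 0)

def pvStk (xs : List Int) (i : Nat) : List Nat := ((List.range i).filter (pvCondB xs i)).reverse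

-- the pop loop = dropWhile + pointwise assignment over takeWhile
theorem lc3113Pop_eq (nums : List Int) (xi : Int) :
    ∀ (stack post : List Int),
    lc3113Pop nums xi stack post =
      (stack.dropWhile (fun q => decide (PySem.List.pyGetD nums xi 0 > PySem.List.pyGetD nums q 0)),
       (stack.takeWhile (fun q => decide (PySem.List.pyGetD nums xi 0 > PySem.List.pyGetD nums q 0))).foldl
         (fun p q => PySem.List.pySetD p q xi) post) := by
  intro stack
  induction stack with
  | nil => intro post; rfl
  | cons q rest ih =>
    intro post
    by_cases h : PySem.List.pyGetD nums xi 0 > PySem.List.pyGetD nums q 0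
    · simp only [lc3113Pop, if_pos h, ih, List.dropWhile_cons, List.takeWhile_cons, decide_eq_true h]
      simp
    · simp only [lc3113Pop, if_neg h, List.dropWhile_cons, List.takeWhile_cons]
      simp [h]

-- on a list whose pairwise relation forces the predicate to be prefix-closed,
-- takeWhile is filter and dropWhile is the complementary filter
theorem pvTakeDrop_eq_filter {α : Type} (p : α → Bool) (R : α → α → Prop) :
    ∀ (l : List α), l.Pairwise R → (∀ a b, a ∈ l → b ∈ l → R a b → p b = true → p a = true) →
    l.takeWhile p = l.filter p ∧ l.dropWhile p = l.filter (fun a => ! p a) := by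
  intro l
  induction l with
  | nil => intro _ _; simp
  | cons a t ih =>
    intro hpw hmono
    rw [List.pairwise_cons] at hpw
    by_cases h : p a
    · have := ih hpw.2 (fun x y hx hy => hmono x y (List.mem_cons_of_mem _ hx) (List.mem_cons_of_mem _ hy))
      simp [List.takeWhile_cons, List.dropWhile_cons, List.filter_cons, h, this.1, this.2]
    · have ht : ∀ b ∈ t, ¬ p b = true := by
        intro b hb hpb
        exact h (hmono a b List.mem_cons_self (List.mem_cons_of_mem _ hb) (hpw.1 b hb) hpb)
      constructor
      · simp only [List.takeWhile_cons, List.filter_cons]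
        rw [if_neg h]
        symm
        rw [if_neg h, List.filter_eq_nil_iff]
        exact ht
      · simp only [List.dropWhile_cons, List.filter_cons]
        rw [if_neg h, if_pos (by simp [h])]
        congr 1
        symm
        rw [List.filter_eq_self]
        intro b hb
        simpa using ht b hb

theorem pvFoldSetD_length (xi : Int) :
    ∀ (l : List Nat) (post : List Int),
    ((l.map (fun (q : Nat) => (q : Int))).foldl (fun p q => PySem.List.pySetD p q xi) post).length = post.length := by
  intro l
  induction l with
  | nil => intro post; rfl
  | cons a t ih =>
    intro post
    rw [List.map_cons, List.foldl_cons, ih, PySem.List.length_pySetD]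

theorem pvFoldSetD_getD (xi : Int) :
    ∀ (l : List Nat) (post : List Int), (∀ q ∈ l, q < post.length) → ∀ r < post.length,
    ((l.map (fun (q : Nat) => (q : Int))).foldl (fun p q => PySem.List.pySetD p q xi) post).getD r 0 =
      if r ∈ l then xi else post.getD r 0 := by
  intro l
  induction l with
  | nil => intro post _ r _; simp
  | cons a t ih =>
    intro post hlt r hr
    rw [List.map_cons, List.foldl_cons]
    have ha : a < post.length := hlt a List.mem_cons_self
    have hlen : (PySem.List.pySetD post (a : Int) xi).length = post.length := PySem.List.length_pySetD _ _ _
    rw [ih (PySem.List.pySetD post (a : Int) xi) (fun q hq => by rw [hlen]; exact hlt q (List.mem_cons_of_mem _ hq)) r (by omega)]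
    have hset : (PySem.List.pySetD post (a : Int) xi).getD r 0 = if r = a then xi else post.getD r 0 := by
      have := PySem.List.pyGetD_pySetD_natCast post a r xi 0 ha
      rwa [PySem.List.pyGetD_natCast, PySem.List.pyGetD_natCast] at this
    by_cases hmem : r ∈ t
    · rw [if_pos hmem, if_pos (List.mem_cons_of_mem _ hmem)]
    · by_cases hra : r = a
      · rw [if_neg hmem, hset, if_pos hra, if_pos (by simp [hra])]
      · rw [if_neg hmem, hset, if_neg hra, if_neg (by simp [hra, hmem])]

-- one step of the phase-1 outer loop preserves the invariant
theorem pvStk_succ (xs : List Int) (i : Nat) (hi : i < xs.length) :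
    pvStk xs (i + 1) = i :: (pvStk xs i).filter (fun q => ! decide (xs.getD q 0 < xs.getD i 0)) := by
  unfold pvStk
  rw [List.range_succ, List.filter_append, List.reverse_append]
  have hcondi : pvCondB xs (i + 1) i = true := by
    unfold pvCondB
    simp only [decide_eq_true_eq]
    intro k hk hik; omega
  have h2 : (List.range i).filter (pvCondB xs (i + 1)) =
      ((List.range i).filter (pvCondB xs i)).filter (fun q => ! decide (xs.getD q 0 < xs.getD i 0)) := by
    rw [List.filter_filter]
    apply List.filter_congr
    intro q hq
    simp only [List.mem_range] at hq
    unfold pvCondB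
    rw [Bool.eq_iff_iff]
    simp only [Bool.and_eq_true, decide_eq_true_eq, Bool.not_eq_true', decide_eq_false_iff_not, not_lt]
    constructor
    · intro h
      constructor
      · exact h i (by omega) hq
      · intro k hk hqk; exact h k (by omega) hqk
    · rintro ⟨h2, h1⟩ k hk hqk
      rcases Nat.lt_or_ge k i with hk' | hk'
      · exact h1 k hk' hqk
      · have : k = i := by omega
        subst this; exact h2
  rw [h2]
  simp [hcondi, List.filter_reverse]

def pvStepA (nums : List Int) (st : List Int × List Int) (i : Int) : List Int × List Int :=
  ((lc3113Pop nums i st.2 st.1).2, i :: (lc3113Pop nums i st.2 st.1).1)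

theorem pvCondB_iff (xs : List Int) (i q : Nat) :
    pvCondB xs i q = true ↔ ∀ k < i, q < k → xs.getD k 0 ≤ xs.getD q 0 := by
  unfold pvCondB; simp

theorem pvStk_mem (xs : List Int) (i q : Nat) :
    q ∈ pvStk xs i ↔ q < i ∧ pvCondB xs i q = true := by
  unfold pvStk
  simp only [List.mem_reverse, List.mem_filter, List.mem_range]

def pvFold1 (xs : List Int) (i : Nat) : List Int × List Int :=
  (List.range i).foldl (fun st (k : Nat) => pvStepA xs st (k : Int))
    (List.replicate xs.length (xs.length : Int), ([] : List Int))

theorem pvPhase1 (xs : List Int) : ∀ i, i ≤ xs.length →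
    (pvFold1 xs i).1.length = xs.length ∧
    (pvFold1 xs i).2 = (pvStk xs i).map (fun (q : Nat) => (q : Int)) ∧
    (∀ q < xs.length, (pvFold1 xs i).1.getD q 0 =
      if pvCondB xs i q then (xs.length : Int) else (pvNge xs q : Int)) := by
  intro i
  induction i with
  | zero =>
    intro _
    refine ⟨by simp [pvFold1], by simp [pvFold1, pvStk], ?_⟩
    intro q hq
    have hcond : pvCondB xs 0 q = true := by
      rw [pvCondB_iff]; intro k hk; omega
    simp [pvFold1, hcond, List.getD_eq_getElem?_getD, List.getElem?_replicate, hq]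
  | succ i ih =>
    intro hi1
    have hi : i < xs.length := by omega
    obtain ⟨hlen, hstack, hpost⟩ := ih (by omega)
    have hstep : pvFold1 xs (i + 1) = pvStepA xs (pvFold1 xs i) (i : Int) := by
      unfold pvFold1
      rw [List.range_succ, List.foldl_append, List.foldl_cons, List.foldl_nil]
    set st := pvFold1 xs i with hst
    -- the predicate over cast indices
    have hfun : ∀ (q : Nat), (decide (PySem.List.pyGetD xs (i : Int) 0 > PySem.List.pyGetD xs ((q : Nat) : Int) 0))
        = decide (xs.getD q 0 < xs.getD i 0) := by
      intro q
      rw [PySem.List.pyGetD_natCast, PySem.List.pyGetD_natCast]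
    have hpw : (pvStk xs i).Pairwise (· > ·) := by
      unfold pvStk
      rw [List.pairwise_reverse]
      exact List.Pairwise.filter _ List.pairwise_lt_range
    have hmono : ∀ a b, a ∈ pvStk xs i → b ∈ pvStk xs i → a > b →
        decide (xs.getD b 0 < xs.getD i 0) = true → decide (xs.getD a 0 < xs.getD i 0) = true := by
      intro a b hamem hbmem hab hb
      rw [pvStk_mem] at hamem hbmem
      simp only [decide_eq_true_eq] at hb ⊢
      have := (pvCondB_iff xs i b).1 hbmem.2 a hamem.1 hab
      omega
    obtain ⟨htake, hdrop⟩ := pvTakeDrop_eq_filter (fun q => decide (xs.getD q 0 < xs.getD i 0)) (· > ·)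
      (pvStk xs i) hpw hmono
    set popped := (pvStk xs i).filter (fun q => decide (xs.getD q 0 < xs.getD i 0)) with hpoppeddef
    have hfeq : ((fun q => decide (PySem.List.pyGetD xs (i:Int) 0 > PySem.List.pyGetD xs q 0)) ∘ (fun (q : Nat) => (q : Int)))
        = (fun q => decide (xs.getD q 0 < xs.getD i 0)) := funext fun q => hfun q
    have hpop : lc3113Pop xs (i : Int) ((pvStk xs i).map (fun (q : Nat) => (q : Int))) st.1 =
        (((pvStk xs i).filter (fun q => ! decide (xs.getD q 0 < xs.getD i 0))).map (fun (q : Nat) => (q : Int)),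
         (popped.map (fun (q : Nat) => (q : Int))).foldl (fun p q => PySem.List.pySetD p q (i : Int)) st.1) := by
      rw [lc3113Pop_eq, List.dropWhile_map, List.takeWhile_map, hfeq, hdrop, htake]
    have hpoplt : ∀ q ∈ popped, q < st.1.length := by
      intro q hq
      rw [hpoppeddef, List.mem_filter, pvStk_mem] at hq
      omega
    refine ⟨?_, ?_, ?_⟩
    · rw [hstep]
      unfold pvStepA
      rw [hstack, hpop]
      simp only
      rw [pvFoldSetD_length, hlen]
    · rw [hstep]
      unfold pvStepA
      rw [hstack, hpop]
      simp only
      rw [pvStk_succ xs i hi]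
      simp only [List.map_cons]
    · intro q hq
      rw [hstep]
      unfold pvStepA
      rw [hstack, hpop]
      simp only
      rw [pvFoldSetD_getD (i : Int) popped st.1 hpoplt q (by omega)]
      by_cases hqp : q ∈ popped
      · -- popped: nge q = i, cond (i+1) q false
        rw [if_pos hqp]
        have hq' : q < i ∧ pvCondB xs i q = true ∧ xs.getD q 0 < xs.getD i 0 := by
          rw [hpoppeddef, List.mem_filter, pvStk_mem] at hqp
          simp only [decide_eq_true_eq] at hqp
          exact ⟨hqp.1.1, hqp.1.2, hqp.2⟩
        have hcond1 : pvCondB xs (i + 1) q = false := by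
          rw [Bool.eq_false_iff]
          intro hcond
          have := (pvCondB_iff xs (i+1) q).1 hcond i (by omega) hq'.1
          omega
        have hnge : pvNge xs q = i := by
          have h1 : i ≤ pvNge xs q := by
            rw [pvNge_ge_iff xs q i (by omega)]
            exact fun k hk1 hk2 => (pvCondB_iff xs i q).1 hq'.2.1 k hk2 hk1
          have h2 : ¬ (i + 1 ≤ pvNge xs q) := by
            intro hc
            have := (pvNge_ge_iff xs q (i+1) (by omega)).1 hc i hq'.1 (by omega)
            omega
          omega
        rw [hcond1, hnge]
        simp
      · rw [if_neg hqp, hpost q hq]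
        by_cases hcond1 : pvCondB xs (i + 1) q = true
        · have hcondi : pvCondB xs i q = true := by
            rw [pvCondB_iff]
            exact fun k hk hqk => (pvCondB_iff xs (i+1) q).1 hcond1 k (by omega) hqk
          rw [hcond1, hcondi]
        · rw [Bool.not_eq_true] at hcond1
          rw [hcond1]
          by_cases hcondi : pvCondB xs i q = true
          · exfalso
            -- cond i but not cond (i+1): the violation is at i, so q was popped
            have hqi : q < i := by
              by_contra hge
              apply absurd hcond1
              rw [Bool.not_eq_false, pvCondB_iff]
              intro k hk hqk
              exact absurd rfl (by omega : ¬ (0 = 0))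
            have hxi : xs.getD q 0 < xs.getD i 0 := by
              by_contra hle
              apply absurd hcond1
              rw [Bool.not_eq_false, pvCondB_iff]
              intro k hk hqk
              rcases Nat.lt_or_ge k i with hk' | hk'
              · exact (pvCondB_iff xs i q).1 hcondi k hk' hqk
              · have : k = i := by omega
                subst this; omega
            exact hqp (by
              rw [hpoppeddef, List.mem_filter, pvStk_mem]
              simp only [decide_eq_true_eq]
              exact ⟨⟨hqi, hcondi⟩, hxi⟩)
          · rw [Bool.not_eq_true] at hcondi
            rw [hcondi]

-- ===== generic counting lemmas =====
theorem pvMapGetDRange {α : Type} (l : List α) (d : α) :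
    (List.range l.length).map (fun i => l.getD i d) = l := by
  apply List.ext_getElem (by simp)
  intro i h1 h2
  simp [List.getD_eq_getElem?_getD, List.getElem?_eq_getElem, h2]

theorem pvCountPGetD {α : Type} (l : List α) (d : α) (p : α → Bool) :
    (List.range l.length).countP (fun i => p (l.getD i d)) = l.countP p := by
  conv_rhs => rw [← pvMapGetDRange l d]
  rw [List.countP_map]
  rfl

theorem pvSumMapAddNat (l : List Nat) (f g : Nat → Nat) :
    (l.map (fun k => f k + g k)).sum = (l.map f).sum + (l.map g).sum := by
  induction l with
  | nil => simp
  | cons a t ih => simp [ih]; omega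

theorem pvSumIte {α : Type} (l : List α) (p : α → Bool) :
    (l.map (fun k => if p k then 1 else 0)).sum = l.countP p := by
  induction l with
  | nil => simp
  | cons a t ih =>
    simp only [List.map_cons, List.sum_cons, ih, List.countP_cons]
    by_cases h : p a <;> simp [h] <;> omega

theorem pvSumCountPSwap (m1 m2 : Nat) (p : Nat → Nat → Bool) :
    ((List.range m1).map (fun i => (List.range m2).countP (p i))).sum
      = ((List.range m2).map (fun k => (List.range m1).countP (fun i => p i k))).sum := by
  induction m1 with
  | zero => simp
  | succ m ih =>
    have hsplit : ∀ k, (List.range m ++ [m]).countP (fun i => p i k)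
        = (List.range m).countP (fun i => p i k) + (if p m k then 1 else 0) := by
      intro k
      rw [List.countP_append, List.countP_cons, List.countP_nil]
      by_cases h : p m k <;> simp [h]
    rw [List.range_succ, List.map_append, List.sum_append]
    simp only [List.map_cons, List.map_nil, List.sum_cons, List.sum_nil, Nat.add_zero]
    rw [ih]
    rw [List.map_congr_left (fun k _ => hsplit k), pvSumMapAddNat, pvSumIte]

theorem pvCountPRangeExt (n p : Nat) (hp : p < n) (pred : Nat → Bool) :
    (List.range (p + 1)).countP pred = (List.range n).countP (fun q => decide (q ≤ p) && pred q) := by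
  have hn : n = (p + 1) + (n - (p + 1)) := by omega
  conv_rhs => rw [hn, List.range_add]
  rw [List.countP_append]
  have h2 : (List.countP (fun q => decide (q ≤ p) && pred q) ((List.range (n - (p+1))).map (fun x => p + 1 + x))) = 0 := by
    rw [List.countP_eq_zero]
    intro a ha
    simp only [List.mem_map] at ha
    obtain ⟨x, _, rfl⟩ := ha
    simp only [Bool.and_eq_true, decide_eq_true_eq]
    rintro ⟨h1, _⟩
    omega
  rw [h2, Nat.add_zero]
  apply List.countP_congr
  intro q hq
  simp only [List.mem_range] at hq
  simp only [Bool.and_eq_true, decide_eq_true_eq]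
  constructor
  · intro h; exact ⟨by omega, h⟩
  · rintro ⟨_, h⟩; exact h

-- a strictly sorted, downward-closed-from-i list of naturals is an interval
theorem pvSortedDC : ∀ (S : List Nat) (i : Nat), S.Pairwise (· < ·) →
    (∀ s ∈ S, i ≤ s) → (∀ s ∈ S, ∀ k, i ≤ k → k ≤ s → k ∈ S) → S = List.range' i S.length := by
  intro S
  induction S with
  | nil => intro i _ _ _; simp
  | cons a t ih =>
    intro i hpw hlb hdc
    rw [List.pairwise_cons] at hpw
    have hai : a = i := by
      have h1 : i ≤ a := hlb a List.mem_cons_self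
      have h2 : i ∈ a :: t := hdc a List.mem_cons_self i le_rfl h1
      rcases List.mem_cons.1 h2 with rfl | hit
      · rfl
      · have := hpw.1 i hit; omega
    subst hai
    have ht : t = List.range' (a + 1) t.length := by
      apply ih (a + 1) hpw.2
      · intro s hs; exact hpw.1 s hs
      · intro s hs k hk1 hk2
        have hkS : k ∈ a :: t := hdc s (List.mem_cons_of_mem _ hs) k (by omega) hk2
        rcases List.mem_cons.1 hkS with rfl | hkt
        · omega
        · exact hkt
    rw [List.length_cons, List.range'_succ]
    exact congrArg (a :: ·) ht

-- ===== dict =====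
def pvIdxN (xs : List Int) (v : Int) : List Nat :=
  (List.range xs.length).filter (fun q => decide (xs.getD q 0 = v))

def pvDct (xs : List Int) : PySem.Dict Int (List Int) :=
  (PySem.List.enumerate xs 0).foldl (fun d p => d.modify p.2 [] (fun l => l ++ [p.1])) PySem.Dict.empty

theorem pvDct_keys (xs : List Int) : (pvDct xs).keys = PySem.Set.ofList xs := by
  unfold pvDct
  rw [PySem.Dict.keys_foldl_modify_key (key := Prod.snd) (f := fun _ p => (fun l => l ++ [p.1]))]
  rw [PySem.List.map_snd_enumerate]
  rw [PySem.Dict.keys_empty]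
  rfl

theorem pvDct_getD (xs : List Int) (v : Int) :
    (pvDct xs).getD v [] = (pvIdxN xs v).map (fun (q : Nat) => (q : Int)) := by
  unfold pvDct
  have henum : PySem.List.enumerate xs 0
      = ((List.range xs.length).map (fun (q : Nat) => (q : Int))).map (fun j => (j, PySem.List.pyGetD xs j 0)) := by
    rw [PySem.List.enumerate_eq_map_pyRange xs 0]
    congr 1
    rw [PySem.List.pyRange_one]
    simp [PySem.List.len]
  rw [henum, List.map_map]
  have hswap : ((List.range xs.length).map ((fun j => (j, PySem.List.pyGetD xs j 0)) ∘ (fun (q : Nat) => (q : Int))))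
      = ((List.range xs.length).map (fun (q : Nat) => (xs.getD q 0, (q : Int))) ).map (fun p => (p.2, p.1)) := by
    rw [List.map_map]
    apply List.map_congr_left
    intro q _
    simp [PySem.List.pyGetD_natCast]
  rw [hswap]
  rw [List.foldl_map]
  show (List.foldl (fun d p => d.modify p.1 [] (fun l => l ++ [p.2])) PySem.Dict.empty
      ((List.range xs.length).map (fun (q : Nat) => (xs.getD q 0, (q : Int))))).getD v [] = _
  have hmain := PySem.Dict.getD_foldl_modify_append
    (l := (List.range xs.length).map (fun (q : Nat) => (xs.getD q 0, (q : Int))))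
    (d := (PySem.Dict.empty : PySem.Dict Int (List Int))) (c := v)
  simp only [PySem.Dict.getD_empty, List.nil_append] at hmain
  rw [hmain]
  rw [List.filter_map, List.map_map]
  unfold pvIdxN
  have hpred : ((List.range xs.length).filter ((fun p => p.1 == v) ∘ (fun (q : Nat) => (xs.getD q 0, (q : Int)))))
      = (List.range xs.length).filter (fun q => decide (xs.getD q 0 = v)) := by
    apply List.filter_congr
    intro q _
    rw [Bool.eq_iff_iff]
    simp
  rw [hpred]
  apply List.map_congr_left
  intro q _
  simp

-- ===== two-pointer, per value =====
abbrev pvValid (xs : List Int) (v : Int) (i k : Nat) : Prop :=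
  (pvIdxN xs v).getD k 0 ≤ pvNge xs ((pvIdxN xs v).getD i 0)

def pvCnt (xs : List Int) (v : Int) (i : Nat) : Nat :=
  (List.range (pvIdxN xs v).length).countP (fun k => decide (i ≤ k ∧ pvValid xs v i k))

theorem pvIdxN_mem (xs : List Int) (v : Int) (q : Nat) :
    q ∈ pvIdxN xs v ↔ q < xs.length ∧ xs.getD q 0 = v := by
  unfold pvIdxN
  simp [List.mem_filter]

theorem pvIdxN_pw (xs : List Int) (v : Int) : (pvIdxN xs v).Pairwise (· < ·) :=
  List.Pairwise.filter _ List.pairwise_lt_range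

theorem pvIdxN_getD_mem (xs : List Int) (v : Int) (k : Nat) (hk : k < (pvIdxN xs v).length) :
    (pvIdxN xs v).getD k 0 < xs.length ∧ xs.getD ((pvIdxN xs v).getD k 0) 0 = v := by
  have : (pvIdxN xs v).getD k 0 ∈ pvIdxN xs v := by
    rw [List.getD_eq_getElem?_getD, List.getElem?_eq_getElem hk]
    exact List.getElem_mem hk
  exact (pvIdxN_mem xs v _).1 this

theorem pvIdxN_mono (xs : List Int) (v : Int) (i k : Nat) (hik : i ≤ k) (hk : k < (pvIdxN xs v).length) :
    (pvIdxN xs v).getD i 0 ≤ (pvIdxN xs v).getD k 0 := by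
  rcases Nat.eq_or_lt_of_le hik with rfl | hlt
  · omega
  · have := List.pairwise_iff_getElem.1 (pvIdxN_pw xs v) i k (by omega) hk hlt
    rw [List.getD_eq_getElem?_getD, List.getElem?_eq_getElem (by omega : i < (pvIdxN xs v).length),
      List.getD_eq_getElem?_getD, List.getElem?_eq_getElem hk]
    exact this.le

theorem pvIdxN_smono (xs : List Int) (v : Int) (i k : Nat) (hik : i < k) (hk : k < (pvIdxN xs v).length) :
    (pvIdxN xs v).getD i 0 < (pvIdxN xs v).getD k 0 := by
  have := List.pairwise_iff_getElem.1 (pvIdxN_pw xs v) i k (by omega) hk hik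
  rw [List.getD_eq_getElem?_getD, List.getElem?_eq_getElem (by omega : i < (pvIdxN xs v).length),
    List.getD_eq_getElem?_getD, List.getElem?_eq_getElem hk]
  exact this

theorem pvValid_self (xs : List Int) (v : Int) (i : Nat) (hi : i < (pvIdxN xs v).length) :
    pvValid xs v i i := by
  unfold pvValid
  exact (pvNge_lb xs _ (pvIdxN_getD_mem xs v i hi).1).le

-- valid is downward closed in k
theorem pvValid_dc (xs : List Int) (v : Int) (i k k' : Nat) (h1 : i ≤ k') (h2 : k' ≤ k)
    (hk : k < (pvIdxN xs v).length) (hv : pvValid xs v i k) : pvValid xs v i k' := by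
  unfold pvValid at hv ⊢
  have := pvIdxN_mono xs v k' k h2 hk
  omega

-- valid transfers to later left rows
theorem pvValid_tr (xs : List Int) (v : Int) (i i' k : Nat) (h1 : i ≤ i') (h2 : i' ≤ k)
    (hk : k < (pvIdxN xs v).length) (hv : pvValid xs v i k) : pvValid xs v i' k := by
  unfold pvValid at hv ⊢
  have hi : i < (pvIdxN xs v).length := by omega
  have hi' : i' < (pvIdxN xs v).length := by omega
  obtain ⟨hqn, hqv⟩ := pvIdxN_getD_mem xs v i hi
  obtain ⟨hq'n, hq'v⟩ := pvIdxN_getD_mem xs v i' hi'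
  obtain ⟨hrn, hrv⟩ := pvIdxN_getD_mem xs v k hk
  set q := (pvIdxN xs v).getD i 0 with hq
  set q' := (pvIdxN xs v).getD i' 0 with hq'
  set r := (pvIdxN xs v).getD k 0 with hr
  have hqq' : q ≤ q' := pvIdxN_mono xs v i i' h1 hi'
  have hq'r : q' ≤ r := pvIdxN_mono xs v i' k h2 hk
  have hmid := (pvNge_ge_iff xs q r (by omega)).1 hv
  rw [pvNge_ge_iff xs q' r (by omega)]
  intro t ht1 ht2
  have := hmid t (by omega) ht2
  omega

theorem pvCnt_char (xs : List Int) (v : Int) (i : Nat) (hi : i < (pvIdxN xs v).length) :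
    ∀ k, (k < (pvIdxN xs v).length ∧ i ≤ k ∧ pvValid xs v i k) ↔ (i ≤ k ∧ k < i + pvCnt xs v i) := by
  set m := (pvIdxN xs v).length with hm
  set S := (List.range m).filter (fun k => decide (i ≤ k ∧ pvValid xs v i k)) with hS
  have hmemS : ∀ k, k ∈ S ↔ (k < m ∧ i ≤ k ∧ pvValid xs v i k) := by
    intro k
    rw [hS, List.mem_filter, List.mem_range]
    simp
  have hrange : S = List.range' i S.length := by
    apply pvSortedDC
    · exact List.Pairwise.filter _ List.pairwise_lt_range
    · intro s hs; exact ((hmemS s).1 hs).2.1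
    · intro s hs k hk1 hk2
      obtain ⟨hsm, hsi, hsv⟩ := (hmemS s).1 hs
      rw [hmemS]
      exact ⟨by omega, hk1, pvValid_dc xs v i s k hk1 hk2 hsm hsv⟩
  have hlenS : S.length = pvCnt xs v i := by
    rw [hS, ← List.countP_eq_length_filter]
    rfl
  intro k
  rw [← hmemS]
  conv_lhs => rw [hrange]
  rw [List.mem_range'_1, hlenS]

theorem pvCnt_pos (xs : List Int) (v : Int) (i : Nat) (hi : i < (pvIdxN xs v).length) :
    1 ≤ pvCnt xs v i := by
  have := (pvCnt_char xs v i hi i).1 ⟨hi, le_rfl, pvValid_self xs v i hi⟩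
  omega

theorem pvJ_mono (xs : List Int) (v : Int) (i i' : Nat) (h1 : i ≤ i') (h2 : i' < (pvIdxN xs v).length) :
    i + pvCnt xs v i ≤ i' + pvCnt xs v i' := by
  have hi : i < (pvIdxN xs v).length := by omega
  set k := i + pvCnt xs v i - 1 with hk
  have hp := pvCnt_pos xs v i hi
  rcases Nat.lt_or_ge k i' with h | h
  · have := pvCnt_pos xs v i' h2
    omega
  · obtain ⟨hkm, _, hkv⟩ := (pvCnt_char xs v i hi k).2 ⟨by omega, by omega⟩
    have hv' := pvValid_tr xs v i i' k h1 h hkm hkv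
    have := (pvCnt_char xs v i' h2 k).1 ⟨hkm, h, hv'⟩
    omega

-- (shared spec defs, also used by the B side)
abbrev pvOk (xs : List Int) (q p : Nat) : Prop :=
  xs.getD q 0 = xs.getD p 0 ∧ ∀ k ≤ p, q ≤ k → xs.getD k 0 ≤ xs.getD p 0

def pvC (xs : List Int) (p : Nat) : Nat := (List.range (p+1)).countP (fun q => decide (pvOk xs q p))

def pvS (xs : List Int) : Nat := ((List.range xs.length).map (pvC xs)).sum

theorem pvGetLst (l : List Nat) (k : Nat) :
    PySem.List.pyGetD (l.map (fun (q : Nat) => (q : Int))) ((k : Nat) : Int) 0 = ((l.getD k 0 : Nat) : Int) := by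
  rw [PySem.List.pyGetD_natCast]
  have := List.getD_map l 0 (n := k) (f := fun (q : Nat) => (q : Int))
  simpa using this

theorem pvAdv_eq (xs : List Int) (v : Int) (post : List Int)
    (hpost : ∀ q < xs.length, post.getD q 0 = (pvNge xs q : Int))
    (i : Nat) (hi : i < (pvIdxN xs v).length) :
    ∀ (d j : Nat), i ≤ j → j < i + pvCnt xs v i → i + pvCnt xs v i - 1 - j ≤ d →
    lc3113Adv post ((pvIdxN xs v).map (fun (q : Nat) => (q : Int))) (((pvIdxN xs v).length : Nat) : Int) ((i : Nat) : Int) ((j : Nat) : Int)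
      = ((i + pvCnt xs v i - 1 : Nat) : Int) := by
  have hcond : ∀ (j : Nat),
      (((j : Nat) : Int) + 1 < (((pvIdxN xs v).length : Nat) : Int) ∧
        PySem.List.pyGetD post (PySem.List.pyGetD ((pvIdxN xs v).map (fun (q : Nat) => (q : Int))) ((i : Nat) : Int) 0) 0 ≥
          PySem.List.pyGetD ((pvIdxN xs v).map (fun (q : Nat) => (q : Int))) (((j : Nat) : Int) + 1) 0)
      ↔ (j + 1 < (pvIdxN xs v).length ∧ pvValid xs v i (j + 1)) := by
    intro j
    have hj1 : ((j : Nat) : Int) + 1 = (((j + 1 : Nat) : Nat) : Int) := by push_cast; ring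
    rw [hj1, pvGetLst, pvGetLst]
    obtain ⟨hqn, _⟩ := pvIdxN_getD_mem xs v i hi
    rw [PySem.List.pyGetD_natCast, hpost _ hqn]
    unfold pvValid
    constructor
    · rintro ⟨h1, h2⟩
      exact ⟨by exact_mod_cast h1, by exact_mod_cast h2⟩
    · rintro ⟨h1, h2⟩
      exact ⟨by exact_mod_cast h1, by exact_mod_cast h2⟩
  intro d
  induction d with
  | zero =>
    intro j hij hjc hd
    have hj : j = i + pvCnt xs v i - 1 := by omega
    rw [lc3113Adv, dif_neg]
    · rw [hj]
    · intro hc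
      obtain ⟨h1, h2⟩ := (hcond j).1 hc
      have := (pvCnt_char xs v i hi (j + 1)).1 ⟨h1, by omega, h2⟩
      omega
  | succ d ih =>
    intro j hij hjc hd
    by_cases hstop : j + 1 < i + pvCnt xs v i
    · have hc3 := (pvCnt_char xs v i hi (j + 1)).2 ⟨by omega, hstop⟩
      rw [lc3113Adv, dif_pos ((hcond j).2 ⟨hc3.1, hc3.2.2⟩)]
      have hj1 : ((j : Nat) : Int) + 1 = (((j + 1 : Nat) : Nat) : Int) := by push_cast; ring
      rw [hj1]
      exact ih (j + 1) (by omega) (by omega) (by omega)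
    · have hj : j = i + pvCnt xs v i - 1 := by omega
      rw [lc3113Adv, dif_neg]
      · rw [hj]
      · intro hc
        obtain ⟨h1, h2⟩ := (hcond j).1 hc
        have := (pvCnt_char xs v i hi (j + 1)).1 ⟨h1, by omega, h2⟩
        omega

def pvInnerStep (post lst : List Int) (m : Int) (s : Int × Int) (i : Int) : Int × Int :=
  (lc3113Adv post lst m i (if s.1 < i then i else s.1),
   s.2 + (lc3113Adv post lst m i (if s.1 < i then i else s.1) - i + 1))

theorem pvInner (xs : List Int) (v : Int) (post : List Int)
    (hpost : ∀ q < xs.length, post.getD q 0 = (pvNge xs q : Int)) :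
    ∀ i0, i0 ≤ (pvIdxN xs v).length → ∀ (ans : Int),
    (List.range i0).foldl (fun s (k : Nat) => pvInnerStep post ((pvIdxN xs v).map (fun (q : Nat) => (q : Int))) (((pvIdxN xs v).length : Nat) : Int) s ((k : Nat) : Int)) ((0 : Int), ans)
      = ((if i0 = 0 then (0 : Int) else ((i0 - 1 + pvCnt xs v (i0 - 1) - 1 : Nat) : Int)),
         ans + ((((List.range i0).map (pvCnt xs v)).sum : Nat) : Int)) := by
  intro i0
  induction i0 with
  | zero => intro _ ans; simp
  | succ i0 ih =>
    intro hi1 ans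
    have hi : i0 < (pvIdxN xs v).length := by omega
    rw [List.range_succ, List.foldl_append, List.foldl_cons, List.foldl_nil, ih (by omega) ans]
    have hcnt1 := pvCnt_pos xs v i0 hi
    have hsum : ((((List.range i0 ++ [i0]).map (pvCnt xs v)).sum : Nat) : Int)
        = (((List.range i0).map (pvCnt xs v)).sum : Int) + (pvCnt xs v i0 : Int) := by
      rw [List.map_append, List.sum_append]
      push_cast
      simp
    by_cases h0 : i0 = 0
    · subst h0
      simp only [if_true, reduceIte, List.range_zero, List.map_nil, List.sum_nil, Nat.cast_zero, add_zero]
      unfold pvInnerStep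
      simp only
      rw [if_neg (lt_irrefl (0 : Int))]
      have hadv := pvAdv_eq xs v post hpost 0 hi (pvCnt xs v 0) 0 le_rfl (by omega) (by omega)
      simp only [Nat.cast_zero] at hadv
      rw [hadv, Prod.mk.injEq]
      have hc0 := pvCnt_pos xs v 0 hi
      refine ⟨by norm_num, ?_⟩
      simp only [List.nil_append, List.map_cons, List.map_nil, List.sum_cons, List.sum_nil, Nat.add_zero]
      push_cast
      omega
    · rw [if_neg h0]
      unfold pvInnerStep
      simp only
      set J := i0 - 1 + pvCnt xs v (i0 - 1) - 1 with hJ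
      have hJlt : J < i0 + pvCnt xs v i0 := by
        have := pvJ_mono xs v (i0 - 1) i0 (by omega) hi
        have := pvCnt_pos xs v (i0 - 1) (by omega)
        omega
      have hj0 : (if ((J : Nat) : Int) < ((i0 : Nat) : Int) then ((i0 : Nat) : Int) else ((J : Nat) : Int))
          = ((max J i0 : Nat) : Int) := by
        by_cases h : J < i0
        · rw [if_pos (by exact_mod_cast h)]
          congr 1
          omega
        · rw [if_neg (by exact_mod_cast h)]
          congr 1
          omega
      rw [hj0]
      have hadv := pvAdv_eq xs v post hpost i0 hi (i0 + pvCnt xs v i0) (max J i0) (by omega) (by omega) (by omega)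
      rw [hadv, Prod.mk.injEq]
      refine ⟨by norm_num, ?_⟩
      rw [hsum]
      have h1 : i0 + pvCnt xs v i0 - 1 ≥ i0 := by omega
      have h2 : ((i0 + pvCnt xs v i0 - 1 : Nat) : Int) = (i0 : Int) + (pvCnt xs v i0 : Int) - 1 := by
        omega
      rw [h2]
      ring

theorem pvPostFinal (xs : List Int) : ∀ q < xs.length,
    (pvFold1 xs xs.length).1.getD q 0 = (pvNge xs q : Int) := by
  intro q hq
  obtain ⟨_, _, hpost⟩ := pvPhase1 xs xs.length le_rfl
  rw [hpost q hq]
  by_cases hc : pvCondB xs xs.length q = true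
  · rw [if_pos hc]
    have h1 : xs.length ≤ pvNge xs q := by
      rw [pvNge_ge_iff xs q xs.length le_rfl]
      exact fun k hk1 hk2 => (pvCondB_iff xs xs.length q).1 hc k hk2 hk1
    have h2 := pvNge_le xs q
    have : pvNge xs q = xs.length := by omega
    rw [this]
  · rw [if_neg hc]

theorem pvOk_iff (xs : List Int) (v : Int) (p q : Nat) (hqp : q ≤ p) (hp : p < xs.length)
    (hval : xs.getD p 0 = v) : pvOk xs q p ↔ (xs.getD q 0 = v ∧ p ≤ pvNge xs q) := by
  unfold pvOk
  rw [hval]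
  constructor
  · rintro ⟨h1, h2⟩
    refine ⟨h1, ?_⟩
    rw [pvNge_ge_iff xs q p (by omega)]
    intro t ht1 ht2
    have := h2 t (by omega) (by omega)
    omega
  · rintro ⟨h1, h2⟩
    refine ⟨h1, ?_⟩
    intro k hk hqk
    rcases Nat.eq_or_lt_of_le hk with rfl | hkp
    · omega
    · rcases Nat.eq_or_lt_of_le hqk with rfl | hqk'
      · omega
      · have := (pvNge_ge_iff xs q p (by omega)).1 h2 k hqk' hkp
        omega

theorem pvColEq (xs : List Int) (v : Int) (k : Nat) (hk : k < (pvIdxN xs v).length) :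
    (List.range (pvIdxN xs v).length).countP (fun i => decide (i ≤ k ∧ pvValid xs v i k))
      = pvC xs ((pvIdxN xs v).getD k 0) := by
  obtain ⟨hp, hpv⟩ := pvIdxN_getD_mem xs v k hk
  set p := (pvIdxN xs v).getD k 0 with hpdef
  have hstep1 : (List.range (pvIdxN xs v).length).countP (fun i => decide (i ≤ k ∧ pvValid xs v i k))
      = (List.range (pvIdxN xs v).length).countP
          (fun i => (fun q => decide (q ≤ p ∧ p ≤ pvNge xs q)) ((pvIdxN xs v).getD i 0)) := by
    apply List.countP_congr
    intro i hi
    simp only [List.mem_range] at hi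
    simp only [decide_eq_true_eq]
    unfold pvValid
    constructor
    · rintro ⟨h1, h2⟩
      exact ⟨pvIdxN_mono xs v i k h1 hk, h2⟩
    · rintro ⟨h1, h2⟩
      refine ⟨?_, h2⟩
      by_contra hik
      have := pvIdxN_smono xs v k i (by omega) hi
      omega
  rw [hstep1, pvCountPGetD (pvIdxN xs v) 0 (fun q => decide (q ≤ p ∧ p ≤ pvNge xs q))]
  unfold pvIdxN
  rw [List.countP_filter]
  unfold pvC
  rw [show (List.filter (fun q => decide (xs.getD q 0 = v)) (List.range xs.length)).getD k 0 = p from hpdef.symm]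
  rw [pvCountPRangeExt xs.length p hp]
  apply List.countP_congr
  intro q hq
  simp only [List.mem_range] at hq
  simp only [Bool.and_eq_true, decide_eq_true_eq]
  constructor
  · rintro ⟨⟨h1, h2⟩, h3⟩
    exact ⟨h1, (pvOk_iff xs v p q h1 hp hpv).2 ⟨h3, h2⟩⟩
  · rintro ⟨h1, h2⟩
    obtain ⟨h3, h4⟩ := (pvOk_iff xs v p q h1 hp hpv).1 h2
    exact ⟨⟨h1, h4⟩, h3⟩

def pvPairs (xs : List Int) (v : Int) : Nat :=
  ((List.range (pvIdxN xs v).length).map (pvCnt xs v)).sum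

theorem pvPairs_eq (xs : List Int) (v : Int) :
    pvPairs xs v = ((pvIdxN xs v).map (pvC xs)).sum := by
  unfold pvPairs pvCnt
  rw [pvSumCountPSwap]
  have h1 : ∀ k ∈ List.range (pvIdxN xs v).length,
      (List.range (pvIdxN xs v).length).countP (fun i => decide (i ≤ k ∧ pvValid xs v i k))
        = (fun k => pvC xs ((pvIdxN xs v).getD k 0)) k := by
    intro k hk
    exact pvColEq xs v k (List.mem_range.1 hk)
  rw [List.map_congr_left h1]
  conv_rhs => rw [← pvMapGetDRange (pvIdxN xs v) 0, List.map_map]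
  rfl

theorem pvFlatSum {α : Type} (l : List α) (g : α → List Nat) (f : Nat → Nat) :
    ((l.flatMap g).map f).sum = (l.map (fun v => ((g v).map f).sum)).sum := by
  induction l with
  | nil => simp
  | cons a t ih => simp [List.flatMap_cons, ih]

theorem pvPerm (xs : List Int) :
    ((PySem.Set.ofList xs).flatMap (fun v => pvIdxN xs v)).Perm (List.range xs.length) := by
  rw [List.perm_iff_count]
  intro a
  rw [List.count_flatMap, List.count_range]
  by_cases ha : a < xs.length
  · rw [if_pos ha]
    have hmem : xs.getD a 0 ∈ PySem.Set.ofList xs := by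
      rw [PySem.Set.mem_ofList]
      rw [List.getD_eq_getElem?_getD, List.getElem?_eq_getElem ha]
      exact List.getElem_mem ha
    have hcnt : ∀ v ∈ PySem.Set.ofList xs, (List.count a ∘ fun v => pvIdxN xs v) v
        = if v == xs.getD a 0 then 1 else 0 := by
      intro v _
      simp only [Function.comp_apply]
      unfold pvIdxN
      by_cases hv : xs.getD a 0 = v
      · rw [List.count_filter (by simp [← List.getD_eq_getElem?_getD, hv]), List.count_range,
          if_pos ha, if_pos (by simp [beq_iff_eq, ← hv])]
      · rw [List.count_eq_zero_of_not_mem, if_neg (by simp only [beq_iff_eq]; exact fun h => hv h.symm)]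
        intro hmem'
        rw [List.mem_filter] at hmem'
        simp only [decide_eq_true_eq] at hmem'
        exact hv hmem'.2
      
    rw [List.map_congr_left hcnt, pvSumIte]
    have : List.countP (fun v => v == xs.getD a 0) (PySem.Set.ofList xs)
        = List.count (xs.getD a 0) (PySem.Set.ofList xs) := rfl
    rw [this, List.count_eq_one_of_mem (PySem.Set.nodup_ofList xs) hmem]
  · rw [if_neg ha]
    have hcnt : ∀ v ∈ PySem.Set.ofList xs, (List.count a ∘ fun v => pvIdxN xs v) v = 0 := by
      intro v _
      simp only [Function.comp_apply]
      apply List.count_eq_zero_of_not_mem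
      intro hmem'
      rw [pvIdxN_mem] at hmem'
      omega
    rw [List.map_congr_left hcnt]
    simp

theorem pvTotal (xs : List Int) :
    ((PySem.Set.ofList xs).map (fun v => pvPairs xs v)).sum = pvS xs := by
  have h1 : ∀ v ∈ PySem.Set.ofList xs, pvPairs xs v = (fun v => ((pvIdxN xs v).map (pvC xs)).sum) v :=
    fun v _ => pvPairs_eq xs v
  rw [List.map_congr_left h1, ← pvFlatSum]
  unfold pvS
  exact ((pvPerm xs).map (pvC xs)).sum_eq

theorem pvRangeCast (n : Nat) :
    PySem.List.pyRange 0 ((n : Nat) : Int) 1 = (List.range n).map (fun (k : Nat) => ((k : Nat) : Int)) := by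
  rw [PySem.List.pyRange_one]
  simp

theorem pvA_eq_pvS (xs : List Int) : lc_3113 xs = (pvS xs : Int) := by
  unfold lc_3113
  simp only
  -- phase 1: the first fold is pvFold1
  have hfirst : (PySem.List.pyRange 0 (xs.length : Int) 1).foldl
      (fun st i =>
        let pp := lc3113Pop xs i st.2 st.1
        (pp.2, i :: pp.1))
      (PySem.List.pyRepeat [(xs.length : Int)] (xs.length : Int), ([] : List Int)) = pvFold1 xs xs.length := by
    rw [pvRangeCast, List.foldl_map, PySem.List.pyRepeat_singleton]
    simp only [Int.toNat_natCast]
    rfl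
  rw [hfirst]
  have hdct : (PySem.List.enumerate xs 0).foldl
      (fun d p => d.modify p.2 [] (fun l => l ++ [p.1]))
      (PySem.Dict.empty : PySem.Dict Int (List Int)) = pvDct xs := rfl
  rw [hdct]
  -- the outer fold adds pvPairs per key
  have hbody : ∀ (ans : Int), ∀ num ∈ (pvDct xs).keys,
      (fun ans num =>
        let lst := (pvDct xs).getD num []
        let m : Int := lst.length
        ((PySem.List.pyRange 0 m 1).foldl
          (fun s i =>
            let j0 := if s.1 < i then i else s.1
            let j1 := lc3113Adv (pvFold1 xs xs.length).1 lst m i j0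
            (j1, s.2 + (j1 - i + 1)))
          ((0 : Int), ans)).2) ans num = ans + (pvPairs xs num : Int) := by
    intro ans num _
    simp only
    rw [pvDct_getD]
    have hlen : ((((pvIdxN xs num).map (fun (q : Nat) => (q : Int))).length : Nat) : Int)
        = (((pvIdxN xs num).length : Nat) : Int) := by rw [List.length_map]
    rw [hlen, pvRangeCast, List.foldl_map]
    have hstep : (fun (s : Int × Int) (k : Nat) =>
        (fun (s : Int × Int) (i : Int) =>
          let j0 := if s.1 < i then i else s.1
          let j1 := lc3113Adv (pvFold1 xs xs.length).1 ((pvIdxN xs num).map (fun (q : Nat) => (q : Int))) (((pvIdxN xs num).length : Nat) : Int) i j0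
          (j1, s.2 + (j1 - i + 1))) s ((k : Nat) : Int))
        = (fun s (k : Nat) => pvInnerStep (pvFold1 xs xs.length).1 ((pvIdxN xs num).map (fun (q : Nat) => (q : Int))) (((pvIdxN xs num).length : Nat) : Int) s ((k : Nat) : Int)) := rfl
    rw [hstep, pvInner xs num (pvFold1 xs xs.length).1 (pvPostFinal xs) (pvIdxN xs num).length le_rfl ans]
    rfl
  rw [PySem.List.foldl_congr_mem (pvDct xs).keys _ (fun acc num => acc + (pvPairs xs num : Int)) 0 hbody]
  rw [PySem.List.foldl_add (pvDct xs).keys (fun num => (pvPairs xs num : Int)) 0]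
  rw [pvDct_keys]
  rw [zero_add]
  rw [← pvTotal xs, Nat.cast_list_sum, List.map_map]
  rfl

-- ===== B-side development =====
abbrev pvVis (xs : List Int) (q : Nat) : Prop := ∀ k < xs.length, q < k → xs.getD k 0 ≤ xs.getD q 0

def pvW (xs : List Int) (v : Int) : Nat :=
  (List.range xs.length).countP (fun q => decide (xs.getD q 0 = v ∧ pvVis xs q))

-- ===== snoc lemmas =====
theorem pvGetD_snoc_lt (xs : List Int) (x : Int) (k : Nat) (h : k < xs.length) :
    (xs ++ [x]).getD k 0 = xs.getD k 0 := by
  simp [List.getD, List.getElem?_append_left h]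

theorem pvGetD_snoc_len (xs : List Int) (x : Int) :
    (xs ++ [x]).getD xs.length 0 = x := by
  simp [List.getD]

theorem pvVis_snoc_lt (xs : List Int) (x : Int) (q : Nat) (h : q < xs.length) :
    pvVis (xs ++ [x]) q ↔ (pvVis xs q ∧ x ≤ xs.getD q 0) := by
  constructor
  · intro hv
    refine ⟨fun k hk hq => ?_, ?_⟩
    · have := hv k (by simp; omega) hq
      rwa [pvGetD_snoc_lt _ _ _ hk, pvGetD_snoc_lt _ _ _ h] at this
    · have := hv xs.length (by simp) h
      rwa [pvGetD_snoc_len, pvGetD_snoc_lt _ _ _ h] at this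
  · rintro ⟨hv, hx⟩ k hk hq
    simp at hk
    rw [pvGetD_snoc_lt _ _ _ h]
    rcases Nat.lt_or_ge k xs.length with hk' | hk'
    · rw [pvGetD_snoc_lt _ _ _ hk']; exact hv k hk' hq
    · have : k = xs.length := by omega
      subst this; rw [pvGetD_snoc_len]; exact hx

theorem pvW_snoc_self (xs : List Int) (x : Int) : pvW (xs ++ [x]) x = pvW xs x + 1 := by
  unfold pvW
  have hlenr : List.range (xs ++ [x]).length = List.range (xs.length + 1) := by simp
  rw [hlenr, List.range_succ, List.countP_append]
  have h2 : List.countP (fun q => decide ((xs ++ [x]).getD q 0 = x ∧ pvVis (xs ++ [x]) q)) [xs.length] = 1 := by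
    simp [pvGetD_snoc_len]
    intro k hk1 hk2
    omega
  rw [h2]
  congr 1
  apply List.countP_congr
  intro q hq
  simp only [List.mem_range] at hq
  simp only [decide_eq_true_eq]
  rw [pvGetD_snoc_lt _ _ _ hq, pvVis_snoc_lt _ _ _ hq]
  constructor
  · rintro ⟨h1, h2, _⟩; exact ⟨h1, h2⟩
  · rintro ⟨h1, h2⟩; exact ⟨h1, h2, by rw [h1]⟩

theorem pvW_snoc_gt (xs : List Int) (x v : Int) (hv : x < v) : pvW (xs ++ [x]) v = pvW xs v := by
  unfold pvW
  have hlenr : List.range (xs ++ [x]).length = List.range (xs.length + 1) := by simp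
  rw [hlenr, List.range_succ, List.countP_append]
  have h2 : List.countP (fun q => decide ((xs ++ [x]).getD q 0 = v ∧ pvVis (xs ++ [x]) q)) [xs.length] = 0 := by
    simp [List.countP_cons, pvGetD_snoc_len]
    intro h; omega
  rw [h2, Nat.add_zero]
  apply List.countP_congr
  intro q hq
  simp only [List.mem_range] at hq
  simp only [decide_eq_true_eq]
  rw [pvGetD_snoc_lt _ _ _ hq, pvVis_snoc_lt _ _ _ hq]
  constructor
  · rintro ⟨h1, h2, _⟩; exact ⟨h1, h2⟩
  · rintro ⟨h1, h2⟩; exact ⟨h1, h2, by rw [h1]; omega⟩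

theorem pvW_snoc_lt (xs : List Int) (x v : Int) (hv : v < x) : pvW (xs ++ [x]) v = 0 := by
  unfold pvW
  rw [List.countP_eq_zero]
  intro q hq
  simp only [List.mem_range] at hq
  simp only [decide_eq_true_eq, not_and]
  intro h1 h2
  have hlen : (xs ++ [x]).length = xs.length + 1 := by simp
  rcases Nat.lt_or_ge q xs.length with hq' | hq'
  · rw [pvVis_snoc_lt _ _ _ hq'] at h2
    rw [pvGetD_snoc_lt _ _ _ hq'] at h1
    omega
  · have : q = xs.length := by simp at hq; omega
    subst this
    rw [pvGetD_snoc_len] at h1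
    omega

theorem pvW_snoc_pos (xs : List Int) (x v : Int) :
    0 < pvW (xs ++ [x]) v ↔ (v = x ∨ (x < v ∧ 0 < pvW xs v)) := by
  rcases lt_trichotomy v x with h | h | h
  · rw [pvW_snoc_lt _ _ _ h]; simp; omega
  · subst h; rw [pvW_snoc_self]; simp
  · rw [pvW_snoc_gt _ _ _ h]
    constructor
    · intro hp; exact Or.inr ⟨h, hp⟩
    · rintro (rfl | ⟨_, hp⟩); omega; exact hp

theorem pvC_snoc_len (xs : List Int) (x : Int) :
    pvC (xs ++ [x]) xs.length = pvW (xs ++ [x]) x := by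
  unfold pvC pvW
  have hlenr : List.range (xs ++ [x]).length = List.range (xs.length + 1) := by simp
  rw [hlenr]
  apply List.countP_congr
  intro q hq
  simp only [List.mem_range] at hq
  simp only [decide_eq_true_eq]
  unfold pvOk pvVis
  rw [pvGetD_snoc_len]
  constructor
  · rintro ⟨h1, h2⟩
    refine ⟨h1, fun k hk hq' => ?_⟩
    rw [h1]
    exact h2 k (by simp at hk; omega) (by omega)
  · rintro ⟨h1, h2⟩
    refine ⟨h1, fun k hk hq' => ?_⟩
    rcases Nat.eq_or_lt_of_le hq' with rfl | hq''
    · rw [h1]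
    · have := h2 k (by simp; omega) hq''
      rw [h1] at this
      exact this

theorem pvC_snoc_lt (xs : List Int) (x : Int) (p : Nat) (hp : p < xs.length) :
    pvC (xs ++ [x]) p = pvC xs p := by
  unfold pvC
  apply List.countP_congr
  intro q hq
  simp only [List.mem_range] at hq
  simp only [decide_eq_true_eq]
  unfold pvOk
  rw [pvGetD_snoc_lt _ _ _ hp]
  constructor <;> rintro ⟨h1, h2⟩
  · refine ⟨by rwa [pvGetD_snoc_lt _ _ _ (by omega)] at h1, fun k hk hq' => ?_⟩
    have := h2 k hk hq'
    rwa [pvGetD_snoc_lt _ _ _ (by omega)] at this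
  · refine ⟨by rwa [pvGetD_snoc_lt _ _ _ (by omega)], fun k hk hq' => ?_⟩
    rw [pvGetD_snoc_lt _ _ _ (by omega)]
    exact h2 k hk hq'

theorem pvS_snoc (xs : List Int) (x : Int) :
    pvS (xs ++ [x]) = pvS xs + pvC (xs ++ [x]) xs.length := by
  unfold pvS
  have hlen : (xs ++ [x]).length = xs.length + 1 := by simp
  rw [hlen, List.range_succ, List.map_append, List.sum_append]
  simp only [List.map_cons, List.map_nil, List.sum_cons, List.sum_nil, Nat.add_zero]
  congr 1
  have hmc : List.map (pvC (xs ++ [x])) (List.range xs.length) = List.map (pvC xs) (List.range xs.length) :=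
    List.map_congr_left (fun p hp => pvC_snoc_lt xs x p (List.mem_range.1 hp))
  rw [hmc]

-- pop = dropWhile
theorem lc3113AltPop_eq (x : Int) (st : List (Int × Int)) :
    lc3113AltPop x st = st.dropWhile (fun p => decide (p.1 < x)) := by
  induction st with
  | nil => rfl
  | cons hd tl ih =>
    obtain ⟨v, c⟩ := hd
    by_cases h : v < x
    · simp [lc3113AltPop, h, List.dropWhile_cons, ih]
    · simp [lc3113AltPop, h, List.dropWhile_cons]

-- the B invariant, proved along the fold
theorem pvAltInv (xs : List Int) :
    (xs.foldl lc3113AltStep ([], 0)).2 = (pvS xs : Int) ∧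
    ((xs.foldl lc3113AltStep ([], 0)).1.map Prod.fst).Pairwise (· < ·) ∧
    (∀ v : Int, v ∈ (xs.foldl lc3113AltStep ([], 0)).1.map Prod.fst ↔ 0 < pvW xs v) ∧
    (∀ pr ∈ (xs.foldl lc3113AltStep ([], 0)).1, pr.2 = (pvW xs pr.1 : Int)) := by
  induction xs using List.reverseRecOn with
  | nil => simp [pvS, pvW]
  | append_singleton xs x ih =>
    obtain ⟨hans, hpw, hmem, hcnt⟩ := ih
    rw [List.foldl_append]
    simp only [List.foldl_cons, List.foldl_nil]
    set st := xs.foldl lc3113AltStep ([], 0) with hst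
    set dropped := st.1.takeWhile (fun p => decide (p.1 < x)) with hdropped
    set rest := st.1.dropWhile (fun p => decide (p.1 < x)) with hrest
    have hsplit : st.1 = dropped ++ rest := (List.takeWhile_append_dropWhile).symm
    have hdlt : ∀ pr ∈ dropped, pr.1 < x := by
      intro pr hpr
      have := List.mem_takeWhile_imp hpr
      simpa using this
    have hpop : lc3113AltPop x st.1 = rest := lc3113AltPop_eq x st.1
    -- pairwise over rest
    have hpwrest : (rest.map Prod.fst).Pairwise (· < ·) := by
      have : rest.Sublist st.1 := List.dropWhile_sublist _
      exact List.Pairwise.sublist (List.Sublist.map Prod.fst this) hpw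
    have hrestmem : ∀ pr ∈ rest, pr ∈ st.1 := by
      intro pr hpr; rw [hsplit]; exact List.mem_append_right _ hpr
    match hr : rest with
    | [] =>
      -- everything popped: x not on stack, W xs x = 0
      have hWx : pvW xs x = 0 := by
        by_contra h
        have : x ∈ st.1.map Prod.fst := (hmem x).2 (Nat.pos_of_ne_zero h)
        rw [hsplit] at this
        simp only [List.append_nil, List.mem_map] at this
        obtain ⟨pr, hpr, hfst⟩ := this
        have := hdlt pr hpr; omega
      have hstep : lc3113AltStep st x = ([(x, 1)], st.2 + 1) := by
        unfold lc3113AltStep; rw [hpop]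
      rw [hstep]
      refine ⟨?_, ?_, ?_, ?_⟩
      · simp only
        rw [hans, pvS_snoc, pvC_snoc_len, pvW_snoc_self, hWx]
        push_cast; ring
      · simp
      · intro v
        simp only [List.map_cons, List.map_nil, List.mem_cons, List.not_mem_nil, or_false]
        rw [pvW_snoc_pos]
        constructor
        · rintro rfl; exact Or.inl rfl
        · rintro (rfl | ⟨hlt, hpos⟩)
          · rfl
          · exfalso
            have : v ∈ st.1.map Prod.fst := (hmem v).2 hpos
            rw [hsplit] at this
            simp only [List.append_nil, List.mem_map] at this
            obtain ⟨pr, hpr, hfst⟩ := this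
            have := hdlt pr hpr; omega
      · intro pr hpr
        simp only [List.mem_cons, List.not_mem_nil, or_false] at hpr
        subst hpr
        simp only
        rw [pvW_snoc_self, hWx]
        simp
    | (v, c) :: t =>
      have hvx : ¬ (v < x) := by
        have h0 := List.head?_dropWhile_not (p := fun p => decide (p.1 < x)) (l := st.1)
        rw [← hrest] at h0
        simpa using h0
      have hvmem : (v, c) ∈ st.1 := hrestmem _ (by simp)
      have htgt : ∀ pr ∈ t, x < pr.1 := by
        intro pr hpr
        have : v < pr.1 := by
          simp only [List.map_cons, List.pairwise_cons] at hpwrest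
          exact hpwrest.1 pr.1 (List.mem_map_of_mem hpr)
        omega
      have htmem : ∀ pr ∈ t, pr ∈ st.1 := by
        intro pr hpr; exact hrestmem _ (by simp [hpr])
      by_cases hvx2 : v = x
      · -- equal-head case
        have hxe : x = v := hvx2.symm
        subst hxe
        have hstep : lc3113AltStep st x = ((x, c + 1) :: t, st.2 + (c + 1)) := by
          unfold lc3113AltStep; rw [hpop]; simp
        rw [hstep]
        have hc : c = (pvW xs x : Int) := hcnt _ hvmem
        refine ⟨?_, ?_, ?_, ?_⟩
        · simp only
          rw [hans, pvS_snoc, pvC_snoc_len, pvW_snoc_self, hc]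
          push_cast; ring
        · simp only [List.map_cons]
          simpa using hpwrest
        · intro w
          simp only [List.map_cons, List.mem_cons]
          rw [pvW_snoc_pos]
          constructor
          · rintro (rfl | hw)
            · exact Or.inl rfl
            · refine Or.inr ⟨?_, ?_⟩
              · obtain ⟨pr, hpr, rfl⟩ := List.mem_map.1 hw
                exact htgt pr hpr
              · exact (hmem w).1 (by rw [hsplit]; simp only [List.map_append, List.map_cons]; exact List.mem_append_right _ (List.mem_cons_of_mem _ hw))
          · rintro (rfl | ⟨hlt, hpos⟩)
            · exact Or.inl rfl
            · have : w ∈ st.1.map Prod.fst := (hmem w).2 hpos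
              rw [hsplit] at this
              simp only [List.map_append, List.map_cons, List.mem_append, List.mem_cons] at this
              rcases this with hd | (rfl | ht)
              · exfalso
                obtain ⟨pr, hpr, rfl⟩ := List.mem_map.1 hd
                have := hdlt pr hpr; omega
              · exact Or.inl rfl
              · exact Or.inr ht
        · intro pr hpr
          simp only [List.mem_cons] at hpr
          rcases hpr with rfl | hpr
          · simp only
            rw [pvW_snoc_self, hc]; push_cast; ring
          · rw [pvW_snoc_gt _ _ _ (htgt pr hpr)]
            exact hcnt pr (htmem pr hpr)
      · -- push case: x < v
        have hxv : x < v := by omega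
        have hstep : lc3113AltStep st x = ((x, 1) :: (v, c) :: t, st.2 + 1) := by
          unfold lc3113AltStep; rw [hpop]; simp [hvx2]
        rw [hstep]
        have hWx : pvW xs x = 0 := by
          by_contra h
          have : x ∈ st.1.map Prod.fst := (hmem x).2 (Nat.pos_of_ne_zero h)
          rw [hsplit] at this
          simp only [List.map_append, List.map_cons, List.mem_append, List.mem_cons] at this
          rcases this with hd | (hx | ht)
          · obtain ⟨pr, hpr, rfl⟩ := List.mem_map.1 hd
            have := hdlt pr hpr; omega
          · omega
          · obtain ⟨pr, hpr, rfl⟩ := List.mem_map.1 ht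
            have := htgt pr hpr; omega
        refine ⟨?_, ?_, ?_, ?_⟩
        · simp only
          rw [hans, pvS_snoc, pvC_snoc_len, pvW_snoc_self, hWx]
          push_cast; ring
        · simp only [List.map_cons]
          simp only [List.map_cons] at hpwrest
          exact List.Pairwise.cons (by
            intro w hw
            simp only [List.mem_cons] at hw
            rcases hw with rfl | hw
            · exact hxv
            · obtain ⟨pr, hpr, rfl⟩ := List.mem_map.1 hw
              exact htgt pr hpr) hpwrest
        · intro w
          simp only [List.map_cons, List.mem_cons]
          rw [pvW_snoc_pos]
          constructor
          · rintro (rfl | rfl | hw)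
            · exact Or.inl rfl
            · exact Or.inr ⟨hxv, (hmem w).1 (List.mem_map_of_mem hvmem)⟩
            · obtain ⟨pr, hpr, rfl⟩ := List.mem_map.1 hw
              exact Or.inr ⟨htgt pr hpr, (hmem pr.1).1 (List.mem_map_of_mem (htmem pr hpr))⟩
          · rintro (rfl | ⟨hlt, hpos⟩)
            · exact Or.inl rfl
            · have : w ∈ st.1.map Prod.fst := (hmem w).2 hpos
              rw [hsplit] at this
              simp only [List.map_append, List.map_cons, List.mem_append, List.mem_cons] at this
              rcases this with hd | (rfl | ht)
              · exfalso
                obtain ⟨pr, hpr, rfl⟩ := List.mem_map.1 hd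
                have := hdlt pr hpr; omega
              · exact Or.inr (Or.inl rfl)
              · exact Or.inr (Or.inr ht)
        · intro pr hpr
          simp only [List.mem_cons] at hpr
          rcases hpr with rfl | rfl | hpr
          · simp only
            rw [pvW_snoc_self, hWx]
            simp
          · rw [pvW_snoc_gt _ _ _ hxv]
            exact hcnt _ hvmem
          · rw [pvW_snoc_gt _ _ _ (htgt pr hpr)]
            exact hcnt pr (htmem pr hpr)

theorem pvAlt_eq_pvS (xs : List Int) : lc_3113_alt xs = (pvS xs : Int) := (pvAltInv xs).1

-- ===== VERDICT (by name: the statement is the Claim_ definition above) =====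
theorem lc_3113_spec : Claim_equal_lc_3113 := by
  intro nums _
  unfold Spec_lc_3113
  rw [pvA_eq_pvS, pvAlt_eq_pvS]
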